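-- pv_equiv track=rewrite | github.com/huytq000605/CF-CP | Codeforces Global Round 22/A.py | solve
-- ===== SOURCE A (Python) =====
-- def solve(n, a, b):
--     t0s = [b[i] for i in range(n) if a[i] == 0]
--     t1s = [b[i] for i in range(n) if a[i] == 1]
--     t0s.sort(reverse = True)
--     t1s.sort(reverse = True)
--     double = min(len(t0s), len(t1s))
--     result = sum([t0s[i] + t1s[i] for i in range(double)]) * 2
--     result += sum([t0s[i] for i in range(double, len(t0s))])
--     result += sum([t1s[i] for i in range(double, len(t1s))])
--     if double * 2 == n:
--         result -= min(b)
--     return result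
-- ===== SOURCE B (Python) =====
-- def sum_smallest(xs, d):
--     # quickselect-style partitioning: sum of the d smallest values of xs
--     if d <= 0:
--         return 0
--     if d >= len(xs):
--         return sum(xs)
--     p = xs[0]
--     lt = [x for x in xs if x < p]
--     eq = [x for x in xs if x == p]
--     gt = [x for x in xs if x > p]
--     if d <= len(lt):
--         return sum_smallest(lt, d)
--     if d <= len(lt) + len(eq):
--         return sum(lt) + (d - len(lt)) * p
--     return sum(lt) + sum(eq) + sum_smallest(gt, d - len(lt) - len(eq))
--
-- def solve(n, a, b):
--     total = 0
--     zeros = []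
--     ones = []
--     for i in range(n):
--         if a[i] == 0:
--             zeros.append(b[i])
--             total += b[i]
--         elif a[i] == 1:
--             ones.append(b[i])
--             total += b[i]
--     if len(zeros) >= len(ones):
--         longer, shorter = zeros, ones
--     else:
--         longer, shorter = ones, zeros
--     result = 2 * total - sum_smallest(longer, len(longer) - len(shorter))
--     if 2 * len(shorter) == n:
--         result -= min(b)
--     return result
-- ===== Notes on version B (the rewrite author's own statement) =====
-- stated objective: alternative
-- what changed: B replaces A's two descending sorts plus indexed prefix/suffix range sums with a single accumulation pass over the input and a quickselect-style three-way-partition recursion that sums the d smallest elements of the longer group, returning 2*total minus that sum.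
-- outside the precondition, e.g. on solve(2, [2, 2], []): A returns 0, B returns 0
import Mathlib
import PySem

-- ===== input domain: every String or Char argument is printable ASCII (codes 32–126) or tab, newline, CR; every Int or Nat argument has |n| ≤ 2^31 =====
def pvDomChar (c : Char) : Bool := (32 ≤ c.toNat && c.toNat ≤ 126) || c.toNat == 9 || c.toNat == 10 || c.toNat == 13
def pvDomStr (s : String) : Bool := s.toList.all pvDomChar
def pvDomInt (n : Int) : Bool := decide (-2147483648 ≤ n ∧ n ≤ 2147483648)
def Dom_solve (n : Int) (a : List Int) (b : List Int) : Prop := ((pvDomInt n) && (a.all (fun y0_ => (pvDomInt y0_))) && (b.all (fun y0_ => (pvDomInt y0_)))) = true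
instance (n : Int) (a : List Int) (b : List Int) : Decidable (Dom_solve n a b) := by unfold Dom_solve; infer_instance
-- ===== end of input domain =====

-- B replaces A's two descending sorts plus indexed prefix/suffix sums by one accumulation pass
-- and a quickselect-style partition summing the d smallest of the longer group (alternative algorithm).

-- ===== PORT A =====
-- pyGetD with default 0 is exact here: Pre_solve keeps every index of range(n) in range of a and b,
-- and the t-list indices produced by A are always in range.
def solve (n : Int) (a : List Int) (b : List Int) : Int :=
  let l0 := ((PySem.List.pyRange 0 n 1).filter (fun i => PySem.List.pyGetD a i 0 == 0)).map
      (fun i => PySem.List.pyGetD b i 0)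
  let l1 := ((PySem.List.pyRange 0 n 1).filter (fun i => PySem.List.pyGetD a i 0 == 1)).map
      (fun i => PySem.List.pyGetD b i 0)
  let t0s := PySem.List.sorted l0 (fun x => x) true
  let t1s := PySem.List.sorted l1 (fun x => x) true
  let double : Int := min (PySem.List.len t0s) (PySem.List.len t1s)
  let result := ((PySem.List.pyRange 0 double 1).map
      (fun i => PySem.List.pyGetD t0s i 0 + PySem.List.pyGetD t1s i 0)).sum * 2
  let result := result +
      ((PySem.List.pyRange double (PySem.List.len t0s) 1).map (fun i => PySem.List.pyGetD t0s i 0)).sum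
  let result := result +
      ((PySem.List.pyRange double (PySem.List.len t1s) 1).map (fun i => PySem.List.pyGetD t1s i 0)).sum
  -- min(b): Pre_solve guarantees b ≠ [] whenever this branch is taken
  if double * 2 == n then result - (PySem.List.min? b (fun x => x)).getD 0 else result

-- ===== PORT B =====
-- quickselect-style partitioning: sum of the d smallest values of xs (port of Source B's sum_smallest)
def sumSmallest (xs : List Int) (d : Int) : Int :=
  if h1 : d ≤ 0 then 0
  else if h2 : PySem.List.len xs ≤ d then xs.sum
  else
    let p := PySem.List.pyGetD xs 0 0
    let lt := xs.filter (fun x => x < p)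
    let eq := xs.filter (fun x => x == p)
    let gt := xs.filter (fun x => p < x)
    if d ≤ (lt.length : Int) then sumSmallest lt d
    else if d ≤ (lt.length : Int) + (eq.length : Int) then lt.sum + (d - (lt.length : Int)) * p
    else lt.sum + eq.sum + sumSmallest gt (d - (lt.length : Int) - (eq.length : Int))
termination_by xs.length
decreasing_by
  · have hlen : 0 < xs.length := by
      simp [PySem.List.len_eq] at h2; omega
    have hp : PySem.List.pyGetD xs 0 0 ∈ xs :=
      PySem.List.pyGetD_mem xs 0 (by simp [PySem.Raise.InRange]; omega)
    simp only [List.length_unattach]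
    rw [show xs.length = xs.attach.length from (List.length_attach (l := xs)).symm]
    exact List.length_filter_lt_length_iff_exists.mpr
      ⟨⟨_, hp⟩, List.mem_attach _ _, by simp⟩
  · have hlen : 0 < xs.length := by
      simp [PySem.List.len_eq] at h2; omega
    have hp : PySem.List.pyGetD xs 0 0 ∈ xs :=
      PySem.List.pyGetD_mem xs 0 (by simp [PySem.Raise.InRange]; omega)
    simp only [List.length_unattach]
    rw [show xs.length = xs.attach.length from (List.length_attach (l := xs)).symm]
    exact List.length_filter_lt_length_iff_exists.mpr
      ⟨⟨_, hp⟩, List.mem_attach _ _, by simp⟩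

def solve_alt (n : Int) (a : List Int) (b : List Int) : Int :=
  let st := (PySem.List.pyRange 0 n 1).foldl
      (fun (st : Int × List Int × List Int) i =>
        let ai := PySem.List.pyGetD a i 0
        let bi := PySem.List.pyGetD b i 0
        if ai == 0 then (st.1 + bi, st.2.1 ++ [bi], st.2.2)
        else if ai == 1 then (st.1 + bi, st.2.1, st.2.2 ++ [bi])
        else st)
      (0, [], [])
  let ls := if st.2.2.length ≤ st.2.1.length then (st.2.1, st.2.2) else (st.2.2, st.2.1)
  let result := 2 * st.1 - sumSmallest ls.1 ((ls.1.length : Int) - (ls.2.length : Int))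
  if 2 * (ls.2.length : Int) == n then result - (PySem.List.min? b (fun x => x)).getD 0 else result

-- ===== PRECONDITION & SPEC =====
-- Pre_solve: where Python A returns — indices 0..n-1 must exist in a and b (else IndexError),
-- and min(b) must not see an empty b (which happens only at n = 0; ValueError). This is slightly
-- narrower than A's exact domain: A never evaluates b[i] at positions where a[i] is neither 0 nor 1,
-- so inputs whose overhanging indices i ≥ len(b) all have a[i] ∉ {0,1} still return in A (see cites).
def Pre_solve (n : Int) (a : List Int) (b : List Int) : Prop :=
  n ≤ (a.length : Int) ∧ n ≤ (b.length : Int) ∧ (n = 0 → b ≠ [])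
instance (n : Int) (a : List Int) (b : List Int) : Decidable (Pre_solve n a b) := by
  unfold Pre_solve; infer_instance
def pvWitness_solve : Int × List Int × List Int := (4, [0, 1, 0, 1], [3, 1, 4, 1])
def Spec_solve (n : Int) (a : List Int) (b : List Int) (out : Int) : Prop := out = solve_alt n a b
instance (n : Int) (a : List Int) (b : List Int) (out : Int) : Decidable (Spec_solve n a b out) := by
  unfold Spec_solve; infer_instance

-- ===== CLAIM (what is proved, stated in full; the proofs are below) =====
def Claim_equal_solve : Prop := ∀ (n : Int) (a : List Int) (b : List Int),
  Dom_solve n a b → Pre_solve n a b → Spec_solve n a b (solve n a b)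

-- ===== LEMMAS AND PROOFS =====

def smallSum (xs : List Int) (d : Nat) : Int :=
  ((PySem.List.sorted xs (fun x => x) false).take d).sum

theorem sorted_true_eq_reverse (xs : List Int) :
    PySem.List.sorted xs (fun x => x) true = (PySem.List.sorted xs (fun x => x) false).reverse := by
  apply PySem.List.eq_of_perm_of_pairwise_le_of_injective (fun x : Int => -x) neg_injective
  · exact (PySem.List.sorted_perm xs _ true).trans
      ((PySem.List.sorted_perm xs _ false).symm.trans (List.reverse_perm _).symm)
  · exact (PySem.List.sorted_pairwise_rev xs _).imp (by intro a b h; omega)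
  · exact (List.pairwise_reverse.mpr ((PySem.List.sorted_pairwise xs _).imp (by intro a b h; omega)))

theorem sum_drop_sorted_true (xs : List Int) (j : Nat) :
    ((PySem.List.sorted xs (fun x => x) true).drop j).sum = smallSum xs (xs.length - j) := by
  rw [sorted_true_eq_reverse, smallSum]
  rcases le_or_gt j xs.length with hj | hj
  · have hlen : (PySem.List.sorted xs (fun x => x) false).length = xs.length :=
      (PySem.List.sorted_perm xs _ false).length_eq
    have h1 : ((PySem.List.sorted xs (fun x => x) false).take (xs.length - j)).reverse
        = (PySem.List.sorted xs (fun x => x) false).reverse.drop j := by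
      rw [List.reverse_take]; congr 1; omega
    rw [← h1, List.sum_reverse]
  · have hlen : (PySem.List.sorted xs (fun x => x) false).length = xs.length :=
      (PySem.List.sorted_perm xs _ false).length_eq
    rw [List.drop_of_length_le (by simp [hlen]; omega)]
    have : xs.length - j = 0 := by omega
    simp [this]

theorem count_filter_zero (xs : List Int) (q : Int → Bool) (z : Int) (hz : q z = false) :
    List.count z (xs.filter q) = 0 :=
  List.count_eq_zero.mpr (fun hm => by
    have h2 := (List.mem_filter.mp hm).2
    rw [hz] at h2; exact Bool.false_ne_true h2)

theorem perm_partition (xs : List Int) (p : Int) :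
    ((xs.filter (fun x => x < p) ++ xs.filter (fun x => x == p)) ++ xs.filter (fun x => p < x)).Perm xs := by
  rw [List.perm_iff_count]
  intro z
  simp only [List.count_append]
  rcases lt_trichotomy z p with h | h | h
  · rw [count_filter_zero xs (fun x => x == p) z (by simp; omega),
      count_filter_zero xs (fun x => decide (p < x)) z (by simp; omega),
      List.count_filter (by simp [h])]
    omega
  · subst h
    rw [count_filter_zero xs (fun x => decide (x < z)) z (by simp),
      count_filter_zero xs (fun x => decide (z < x)) z (by simp),
      List.count_filter (by simp)]
    omega
  · rw [count_filter_zero xs (fun x => decide (x < p)) z (by simp; omega),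
      count_filter_zero xs (fun x => x == p) z (by simp; omega),
      List.count_filter (by simp [h])]
    omega

theorem eq_filter_replicate (xs : List Int) (p : Int) :
    xs.filter (fun x => x == p) = List.replicate (xs.count p) p :=
  List.filter_beq ..

theorem sorted_partition (xs : List Int) (p : Int) :
    PySem.List.sorted xs (fun x => x) false =
      PySem.List.sorted (xs.filter (fun x => x < p)) (fun x => x) false
        ++ xs.filter (fun x => x == p)
        ++ PySem.List.sorted (xs.filter (fun x => p < x)) (fun x => x) false := by
  apply PySem.List.sorted_id_eq_of_perm_of_pairwise
  · exact ((((PySem.List.sorted_perm _ _ false).append (List.Perm.refl _)).append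
      (PySem.List.sorted_perm _ _ false)).trans (perm_partition xs p))
  · have hlt : ∀ x ∈ PySem.List.sorted (xs.filter (fun x => x < p)) (fun x => x) false, x < p := by
      intro x hx
      have := (PySem.List.mem_sorted _ _ _ _).mp hx
      have := (List.mem_filter.mp this).2
      simpa using this
    have heq : ∀ x ∈ xs.filter (fun x => x == p), x = p := by
      intro x hx
      have := (List.mem_filter.mp hx).2
      simpa using this
    have hgt : ∀ x ∈ PySem.List.sorted (xs.filter (fun x => p < x)) (fun x => x) false, p < x := by
      intro x hx
      have := (PySem.List.mem_sorted _ _ _ _).mp hx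
      have := (List.mem_filter.mp this).2
      simpa using this
    rw [List.append_assoc]
    refine List.pairwise_append.mpr ⟨PySem.List.sorted_pairwise _ _, ?_, ?_⟩
    · refine List.pairwise_append.mpr ⟨?_, PySem.List.sorted_pairwise _ _, ?_⟩
      · rw [eq_filter_replicate]
        exact List.pairwise_replicate.mpr (Or.inr le_rfl)
      · intro x hx y hy
        rw [heq x hx]; exact le_of_lt (hgt y hy)
    · intro x hx y hy
      rcases List.mem_append.mp hy with h | h
      · rw [heq y h]; exact le_of_lt (hlt x hx)
      · exact le_of_lt (lt_trans (hlt x hx) (hgt y h))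

theorem smallSum_split (xs : List Int) (p : Int) (n : Nat) :
    smallSum xs n =
      ((PySem.List.sorted (xs.filter (fun x => x < p)) (fun x => x) false).take n).sum
      + ((xs.filter (fun x => x == p)).take (n - (xs.filter (fun x => x < p)).length)).sum
      + ((PySem.List.sorted (xs.filter (fun x => p < x)) (fun x => x) false).take
          (n - (xs.filter (fun x => x < p)).length - (xs.filter (fun x => x == p)).length)).sum := by
  have hl : (PySem.List.sorted (xs.filter (fun x => x < p)) (fun x => x) false).length
      = (xs.filter (fun x => x < p)).length := (PySem.List.sorted_perm _ _ false).length_eq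
  rw [smallSum, sorted_partition xs p, List.take_append,
    List.take_append, List.sum_append, List.sum_append, hl,
    List.length_append, hl, Nat.sub_add_eq]
theorem sumSmallest_eq_aux : ∀ (m : Nat) (xs : List Int), xs.length ≤ m → ∀ (d : Int),
    sumSmallest xs d = smallSum xs d.toNat := by
  intro m
  induction m with
  | zero =>
    intro xs hx d
    have hxe : xs = [] := List.eq_nil_of_length_eq_zero (Nat.le_zero.mp hx)
    subst hxe
    rw [sumSmallest]
    by_cases h1 : d ≤ 0
    · rw [dif_pos h1]; simp [smallSum, Int.toNat_of_nonpos h1]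
    · rw [dif_neg h1, dif_pos (by simp [PySem.List.len_eq]; omega)]
      simp [smallSum, show (PySem.List.sorted ([] : List Int) (fun x => x) false) = [] from rfl]
  | succ m ihm =>
    intro xs hx d
    rw [sumSmallest]
    by_cases h1 : d ≤ 0
    · rw [dif_pos h1]; simp [smallSum, Int.toNat_of_nonpos h1]
    rw [dif_neg h1]
    by_cases h2 : PySem.List.len xs ≤ d
    · rw [dif_pos h2]
      have hlen : (PySem.List.sorted xs (fun x => x) false).length ≤ d.toNat := by
        rw [(PySem.List.sorted_perm xs _ false).length_eq]
        simp [PySem.List.len_eq] at h2; omega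
      rw [smallSum, List.take_of_length_le hlen, (PySem.List.sorted_perm xs _ false).sum_eq]
    rw [dif_neg h2]
    dsimp only
    have hplen : 0 < xs.length := by simp [PySem.List.len_eq] at h2; omega
    have hd : 0 < d ∧ d < (xs.length : Int) := by
      simp [PySem.List.len_eq] at h2; omega
    set p := PySem.List.pyGetD xs 0 0 with hpdef
    have hpm : p ∈ xs := PySem.List.pyGetD_mem xs 0 (by simp [PySem.Raise.InRange]; omega)
    set lt := xs.filter (fun x => decide (x < p)) with hltdef
    set eq := xs.filter (fun x => x == p) with heqdef
    set gt := xs.filter (fun x => decide (p < x)) with hgtdef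
    have hlt_len : lt.length < xs.length :=
      List.length_filter_lt_length_iff_exists.mpr ⟨p, hpm, by simp⟩
    have hgt_len : gt.length < xs.length :=
      List.length_filter_lt_length_iff_exists.mpr ⟨p, hpm, by simp⟩
    have hsplit := smallSum_split xs p d.toNat
    rw [← hltdef, ← heqdef, ← hgtdef] at hsplit
    have hlts : (PySem.List.sorted lt (fun x => x) false).length = lt.length :=
      (PySem.List.sorted_perm _ _ false).length_eq
    split_ifs with h3 h4
    · -- d ≤ |lt|
      rw [ihm lt (by omega) d, hsplit]
      have z1 : d.toNat - lt.length = 0 := by omega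
      simp [z1, smallSum]
    · -- |lt| < d ≤ |lt| + |eq|
      rw [hsplit, List.take_of_length_le (by omega),
        (PySem.List.sorted_perm lt _ false).sum_eq]
      have hrep : eq = List.replicate (xs.count p) p := eq_filter_replicate xs p
      have hclen : eq.length = xs.count p := by rw [hrep]; simp
      have z3 : d.toNat - lt.length - eq.length = 0 := by omega
      rw [z3, hrep, List.take_replicate, List.sum_replicate]
      simp only [List.take_zero, List.sum_nil, add_zero]
      simp only [nsmul_eq_mul]
      have : ((min (d.toNat - lt.length) (List.count p xs) : Nat) : Int) = d - (lt.length : Int) := by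
        omega
      rw [this]
    · -- d > |lt| + |eq|
      have hgts : d - (lt.length : Int) - (eq.length : Int) > 0 := by omega
      rw [ihm gt (by omega) _, hsplit, List.take_of_length_le (by omega),
        (PySem.List.sorted_perm lt _ false).sum_eq, List.take_of_length_le (by omega)]
      have : (d - (lt.length : Int) - (eq.length : Int)).toNat
          = d.toNat - lt.length - eq.length := by omega
      rw [this, smallSum]

theorem sumSmallest_eq (xs : List Int) (d : Int) : sumSmallest xs d = smallSum xs d.toNat :=
  sumSmallest_eq_aux xs.length xs le_rfl d
def F0 (a b : List Int) (is : List Int) : List Int :=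
  (is.filter (fun i => PySem.List.pyGetD a i 0 == 0)).map (fun i => PySem.List.pyGetD b i 0)
def F1 (a b : List Int) (is : List Int) : List Int :=
  (is.filter (fun i => PySem.List.pyGetD a i 0 == 1)).map (fun i => PySem.List.pyGetD b i 0)

theorem foldl_loop (a b : List Int) (is : List Int) : ∀ (t : Int) (zs os : List Int),
    is.foldl (fun (st : Int × List Int × List Int) i =>
        let ai := PySem.List.pyGetD a i 0
        let bi := PySem.List.pyGetD b i 0
        if ai == 0 then (st.1 + bi, st.2.1 ++ [bi], st.2.2)
        else if ai == 1 then (st.1 + bi, st.2.1, st.2.2 ++ [bi])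
        else st) (t, zs, os)
      = (t + (F0 a b is).sum + (F1 a b is).sum, zs ++ F0 a b is, os ++ F1 a b is) := by
  induction is with
  | nil => intro t zs os; simp [F0, F1]
  | cons i is ih =>
    intro t zs os
    rw [List.foldl_cons]
    dsimp only
    by_cases h0 : PySem.List.pyGetD a i 0 = 0
    · rw [if_pos (show ((PySem.List.pyGetD a i 0 == 0) = true) by simp [h0]), ih]
      simp only [F0, F1, List.filter_cons, h0, beq_self_eq_true, if_true, List.map_cons,
        List.sum_cons, Prod.mk.injEq, show ((0:Int) == 1) = false from rfl, Bool.false_eq_true,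
        if_false]
      refine ⟨by omega, by simp, trivial⟩
    · by_cases h1 : PySem.List.pyGetD a i 0 = 1
      · rw [if_neg (show ¬((PySem.List.pyGetD a i 0 == 0) = true) by simp [h0]),
          if_pos (show ((PySem.List.pyGetD a i 0 == 1) = true) by simp [h1]), ih]
        simp only [F0, F1, List.filter_cons, h1, beq_self_eq_true, if_true, List.map_cons,
          List.sum_cons, Prod.mk.injEq, show ((1:Int) == 0) = false from rfl, Bool.false_eq_true,
          if_false]
        refine ⟨by omega, trivial, by simp⟩
      · rw [if_neg (show ¬((PySem.List.pyGetD a i 0 == 0) = true) by simp [h0]),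
          if_neg (show ¬((PySem.List.pyGetD a i 0 == 1) = true) by simp [h1]), ih]
        simp only [F0, F1, List.filter_cons]
        rw [if_neg (by simp [h0]), if_neg (by simp [h1])]

theorem range_map_sum (t : List Int) (k : Int) (h0 : 0 ≤ k) (hk : k ≤ (t.length : Int)) :
    ((PySem.List.pyRange 0 k 1).map (fun i => PySem.List.pyGetD t i 0)).sum
      = t.sum - (t.drop k.toNat).sum := by
  have hsplit := PySem.List.pyRange_one_append 0 k (PySem.List.len t) h0
    (by simp [PySem.List.len_eq]; exact hk)
  have hfull : (PySem.List.pyRange 0 (PySem.List.len t) 1).map (fun i => PySem.List.pyGetD t i 0) = t :=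
    PySem.List.map_pyGetD_pyRange_zero t 0
  have hdrop : (PySem.List.pyRange k (PySem.List.len t) 1).map (fun i => PySem.List.pyGetD t i 0)
      = t.drop k.toNat := PySem.List.map_pyGetD_pyRange t 0 h0
  have : t.sum = ((PySem.List.pyRange 0 k 1).map (fun i => PySem.List.pyGetD t i 0)).sum
      + (t.drop k.toNat).sum := by
    rw [← hdrop, ← List.sum_append, ← List.map_append, ← hsplit, hfull]
  omega
theorem solve_eq_alt (n : Int) (a : List Int) (b : List Int) : solve n a b = solve_alt n a b := by
  rw [solve, solve_alt]
  dsimp only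
  rw [foldl_loop a b _ 0 [] []]
  dsimp only
  simp only [List.nil_append, zero_add, F0, F1]
  set L0 := ((PySem.List.pyRange 0 n 1).filter (fun i => PySem.List.pyGetD a i 0 == 0)).map
      (fun i => PySem.List.pyGetD b i 0) with hL0
  set L1 := ((PySem.List.pyRange 0 n 1).filter (fun i => PySem.List.pyGetD a i 0 == 1)).map
      (fun i => PySem.List.pyGetD b i 0) with hL1
  set T0 := PySem.List.sorted L0 (fun x => x) true with hT0
  set T1 := PySem.List.sorted L1 (fun x => x) true with hT1
  have hlen0 : T0.length = L0.length := (PySem.List.sorted_perm L0 _ true).length_eq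
  have hlen1 : T1.length = L1.length := (PySem.List.sorted_perm L1 _ true).length_eq
  set m : Int := min (PySem.List.len T0) (PySem.List.len T1) with hm
  have hmval : m = min ((L0.length : Int)) ((L1.length : Int)) := by
    rw [hm, PySem.List.len_eq, PySem.List.len_eq, hlen0, hlen1]
  have hm0 : 0 ≤ m := by omega
  have hmA : m ≤ (T0.length : Int) := by rw [hlen0]; omega
  have hmB : m ≤ (T1.length : Int) := by rw [hlen1]; omega
  rw [PySem.List.sum_map_add_int, range_map_sum T0 m hm0 hmA, range_map_sum T1 m hm0 hmB,
    PySem.List.map_pyGetD_pyRange T0 0 hm0, PySem.List.map_pyGetD_pyRange T1 0 hm0,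
    (PySem.List.sorted_perm L0 _ true).sum_eq, (PySem.List.sorted_perm L1 _ true).sum_eq,
    hT0, hT1, sum_drop_sorted_true L0 m.toNat, sum_drop_sorted_true L1 m.toNat,
    sumSmallest_eq]
  set sA := smallSum L0 (L0.length - m.toNat) with hsA
  set sB := smallSum L1 (L1.length - m.toNat) with hsB
  by_cases hc : L1.length ≤ L0.length
  · simp only [if_pos hc]
    have hmeq : m = (L1.length : Int) := by omega
    have e0 : ((L0.length : Int) - (L1.length : Int)).toNat = L0.length - m.toNat := by omega
    have hsB0 : sB = 0 := by
      rw [hsB, show L1.length - m.toNat = 0 from by omega]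
      simp [smallSum]
    rw [e0, ← hsA, show m * 2 = 2 * (L1.length : Int) from by omega] at *
    by_cases hn : ((2 * (L1.length : Int) == n) = true)
    · simp only [if_pos hn]; omega
    · simp only [if_neg hn]; omega
  · simp only [if_neg hc]
    have hmeq : m = (L0.length : Int) := by omega
    have e0 : ((L1.length : Int) - (L0.length : Int)).toNat = L1.length - m.toNat := by omega
    have hsA0 : sA = 0 := by
      rw [hsA, show L0.length - m.toNat = 0 from by omega]
      simp [smallSum]
    rw [e0, ← hsB, show m * 2 = 2 * (L0.length : Int) from by omega] at *
    by_cases hn : ((2 * (L0.length : Int) == n) = true)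
    · simp only [if_pos hn]; omega
    · simp only [if_neg hn]; omega

-- ===== VERDICT (by name: the statement is the Claim_ definition above) =====
theorem solve_spec : Claim_equal_solve := by
  intro n a b _ _
  unfold Spec_solve
  exact solve_eq_alt n a b
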